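-- pv_equiv track=rewrite | github.com/KonradMarzec1991/Codewars-LeetCode | Python/7kyu/7kyu_Reversing Fun.py | reverse_fun
-- ===== SOURCE A (Python) =====
-- def reverse_fun(n):
--     n = n[::-1]  # 1
--     k = 1
--     for _ in range(k, len(n)):
--         first = n[:k]
--         second = n[k:]
--         n = first + second[::-1]
--         k += 1
--     return n
-- ===== SOURCE B (Python) =====
-- def reverse_fun(n):
--     # Single pass: interleave the reversed string with the original and keep len(n) chars.
--     return ''.join(a + b for a, b in zip(reversed(n), n))[:len(n)]
-- ===== Notes on version B (the rewrite author's own statement) =====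
-- stated objective: faster
-- what changed: Replaced the O(n^2) loop of repeated suffix reversals (each rebuilding the whole string) by a single O(n) pass that interleaves the reversed string with the original and keeps the first len(n) characters.
import Mathlib
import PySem

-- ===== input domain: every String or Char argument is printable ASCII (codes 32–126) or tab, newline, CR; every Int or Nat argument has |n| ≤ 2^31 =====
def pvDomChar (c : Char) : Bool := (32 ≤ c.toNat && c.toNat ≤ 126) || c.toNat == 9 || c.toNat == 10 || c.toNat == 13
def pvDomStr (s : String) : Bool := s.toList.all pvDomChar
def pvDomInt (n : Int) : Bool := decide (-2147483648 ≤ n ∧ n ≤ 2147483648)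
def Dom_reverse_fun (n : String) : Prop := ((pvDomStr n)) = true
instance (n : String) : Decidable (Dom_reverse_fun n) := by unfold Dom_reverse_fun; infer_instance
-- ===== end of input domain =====

-- B replaces A's quadratic repeated-suffix-reversal loop by one linear interleaving pass; return values proved equal.

-- ===== PORT A =====
-- one loop body of A: n = n[:k] + n[k:][::-1]; k += 1   (state = (n, k))
def pvStepA (st : List Char × Int) (_i : Int) : List Char × Int :=
  let first := PySem.List.slice st.1 none (some st.2)
  let second := PySem.List.slice st.1 (some st.2) none
  (first ++ (PySem.List.slice? second none none (-1)).getD [], st.2 + 1)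

def reverse_fun (n : String) : String :=
  let l := (PySem.List.slice? n.toList none none (-1)).getD []    -- n = n[::-1]
  -- k = 1; for _ in range(k, len(n)): …
  let st := (PySem.List.pyRange 1 (l.length : Int) 1).foldl pvStepA (l, 1)
  String.ofList st.1

-- ===== PORT B =====
def reverse_fun_alt (n : String) : String :=
  let l := n.toList
  -- ''.join(a + b for a, b in zip(reversed(n), n))[:len(n)]
  let interleaved := (l.reverse.zip l).flatMap (fun ab => [ab.1, ab.2])
  String.ofList (PySem.List.slice interleaved none (some (l.length : Int)))

-- ===== PRECONDITION & SPEC =====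
def Spec_reverse_fun (n : String) (out : String) : Prop := out = reverse_fun_alt n
instance (n : String) (out : String) : Decidable (Spec_reverse_fun n out) := by unfold Spec_reverse_fun; infer_instance

-- ===== CLAIM (what is proved, stated in full; the proofs are below) =====
def Claim_equal_reverse_fun : Prop := ∀ (n : String), Dom_reverse_fun n → Spec_reverse_fun n (reverse_fun n)

-- ===== LEMMAS AND PROOFS =====

-- the permutation both programs compute, as a recursion taking alternately the last and first remaining character
def pvG : List Char → List Char
  | [] => []
  | x :: s => x :: pvG s.reverse
termination_by l => l.length
decreasing_by simp

lemma pvFoldl_stepA : ∀ (xs : List Int) (init : List Char × Int),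
    xs.foldl pvStepA init = (fun st => pvStepA st 0)^[xs.length] init := by
  intro xs
  induction xs with
  | nil => intro init; rfl
  | cons x xs ih =>
      intro init
      simp only [List.foldl_cons, List.length_cons, Function.iterate_succ_apply]
      rw [ih]
      rfl

lemma pvStepA_eq (p t : List Char) :
    pvStepA (p ++ t, (p.length : Int)) 0 = (p ++ t.reverse, (p.length : Int) + 1) := by
  simp [pvStepA, PySem.List.slice_to_natCast, PySem.List.slice_from_natCast,
    PySem.List.slice?_none_none_neg_one]

lemma pvLoop_inv : ∀ (c : Nat) (t p : List Char), c = t.length →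
    (fun st => pvStepA st 0)^[c] (p ++ t, (p.length : Int))
      = (p ++ pvG t.reverse, (p.length : Int) + c) := by
  intro c
  induction c with
  | zero =>
      intro t p hc
      have ht : t = [] := by
        cases t with
        | nil => rfl
        | cons a s => simp at hc
      subst ht
      simp [pvG]
  | succ c ih =>
      intro t p hc
      cases hr : t.reverse with
      | nil =>
          exfalso
          have : t = [] := by simpa using congrArg List.reverse hr
          subst this; simp at hc
      | cons x s =>
          have hlen : c = s.length := by
            have := congrArg List.length hr
            simp at this
            omega
          rw [Function.iterate_succ_apply, pvStepA_eq, hr]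
          have hcons : p ++ x :: s = (p ++ [x]) ++ s := by simp
          have hplen : ((p ++ [x]).length : Int) = (p.length : Int) + 1 := by
            simp
          rw [hcons, ← hplen, ih s (p ++ [x]) hlen]
          have h1 : p ++ [x] ++ pvG s.reverse = p ++ pvG (x :: s) := by simp [pvG]
          have h2 : ((p ++ [x]).length : Int) + (c : Int)
              = (p.length : Int) + ((c + 1 : Nat) : Int) := by simp only [List.length_append, List.length_cons, List.length_nil]; push_cast; ring
          exact Prod.ext h1 h2

lemma pvLen_flat_pairs : ∀ (xs : List (Char × Char)),
    (xs.flatMap (fun ab => [ab.1, ab.2])).length = 2 * xs.length := by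
  intro xs
  induction xs with
  | nil => rfl
  | cons a xs ih => simp [ih]; ring

-- master lemma: A's permutation equals B's truncated interleave
lemma pvG_eq_interleave : ∀ (N : Nat) (l : List Char), l.length ≤ N →
    pvG l.reverse
      = ((l.reverse.zip l).flatMap (fun ab => [ab.1, ab.2])).take l.length := by
  intro N
  induction N with
  | zero =>
      intro l hl
      have : l = [] := List.eq_nil_of_length_eq_zero (Nat.le_zero.mp hl)
      subst this; simp [pvG]
  | succ N ih =>
      intro l hl
      cases hr : l.reverse with
      | nil =>
          have : l = [] := by simpa using congrArg List.reverse hr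
          subst this; simp [pvG]
      | cons w s =>
          have hls : l = s.reverse ++ [w] := by
            have := congrArg List.reverse hr
            simpa using this
          cases hs : s.reverse with
          | nil =>
              have hsnil : s = [] := by simpa using congrArg List.reverse hs
              subst hsnil
              simp at hls
              subst hls
              simp [pvG]
          | cons y t =>
              have hst : s = t.reverse ++ [y] := by
                have := congrArg List.reverse hs
                simpa using this
              have hl2 : l = y :: (t ++ [w]) := by
                rw [hls, hst]; simp
              subst hl2
              have hIH : pvG t.reverse
                  = ((t.reverse.zip t).flatMap (fun ab => [ab.1, ab.2])).take t.length := by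
                exact ih t (by simp at hl; omega)
              rw [pvG, hs, pvG, hst]
              have hz : (w :: (t.reverse ++ [y])).zip (y :: (t ++ [w]))
                  = (w, y) :: (t.reverse.zip t ++ [(y, w)]) := by
                simp [List.zip_append (show t.reverse.length = t.length from by simp)]
              have hlen3 : (y :: (t ++ [w])).length = t.length + 1 + 1 := by simp
              rw [hz, hIH, hlen3]
              simp only [List.flatMap_cons, List.flatMap_append, List.flatMap_nil,
                List.cons_append, List.nil_append, List.append_nil, List.take_succ_cons]
              rw [List.take_append_of_le_length (by rw [pvLen_flat_pairs]; simp [List.length_zip]; omega)]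

lemma pvA_char (n : String) :
    reverse_fun n = String.ofList (pvG n.toList.reverse) := by
  unfold reverse_fun
  simp only [PySem.List.slice?_none_none_neg_one, Option.getD_some]
  cases hl : n.toList.reverse with
  | nil => simp [PySem.List.pyRange_one_eq_nil, pvG]
  | cons y t =>
      rw [pvFoldl_stepA]
      have hcnt : (PySem.List.pyRange 1 ((y :: t).length : Int) 1).length = t.length := by
        rw [PySem.List.length_pyRange_one]
        simp
      rw [hcnt]
      have h1 : (y :: t, (1 : Int)) = (([y] : List Char) ++ t, (([y] : List Char).length : Int)) := by
        simp
      rw [h1, pvLoop_inv t.length t [y] rfl]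
      simp [pvG]

lemma pvB_char (n : String) :
    reverse_fun_alt n
      = String.ofList (((n.toList.reverse.zip n.toList).flatMap
          (fun ab => [ab.1, ab.2])).take n.toList.length) := by
  simp only [reverse_fun_alt, PySem.List.slice_to_natCast]

-- ===== VERDICT (by name: the statement is the Claim_ definition above) =====
theorem reverse_fun_spec : Claim_equal_reverse_fun := by
  intro n _
  unfold Spec_reverse_fun
  rw [pvA_char, pvB_char]
  exact congrArg String.ofList
    (pvG_eq_interleave n.toList.length n.toList (le_refl _))
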